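-- pv_equiv track=rewrite | github.com/epitaphe360/getyourshare-versio2 | backend/moderation_service.py | quick_check_prohibited_keywords
-- ===== SOURCE A (Python) =====
-- def quick_check_prohibited_keywords(text: str) -> bool:
--     """
--     Vérification rapide pour rejeter immédiatement les contenus évidents
--     Retourne True si contenu suspect détecté
--     """
--     text_lower = text.lower()
--
--     # Liste de mots ultra-interdits qui déclenchent un rejet immédiat
--     instant_reject_words = [
--         "porn", "xxx", "sexe", "drogue", "cannabis", "cocaine",
--         "arme", "pistolet", "explosif", "escort", "casino"
--     ]
--
--     for word in instant_reject_words: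
--         if word in text_lower:
--             return True
--
--     return False
-- ===== SOURCE B (Python) =====
-- def quick_check_prohibited_keywords(text: str) -> bool:
--     """Single pass over the text: at each position, test whether any
--     prohibited keyword starts there (instead of one full substring scan
--     per keyword)."""
--     t = text.lower()
--     words = ("porn", "xxx", "sexe", "drogue", "cannabis", "cocaine",
--              "arme", "pistolet", "explosif", "escort", "casino")
--     for i in range(len(t) + 1):
--         if any(t.startswith(w, i) for w in words):
--             return True
--     return False
-- ===== Notes on version B (the rewrite author's own statement) =====
-- stated objective: alternative
-- what changed: Replaces the per-keyword loop of independent substring scans by one left-to-right scan of the text that tests all keywords at each position.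
import Mathlib
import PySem

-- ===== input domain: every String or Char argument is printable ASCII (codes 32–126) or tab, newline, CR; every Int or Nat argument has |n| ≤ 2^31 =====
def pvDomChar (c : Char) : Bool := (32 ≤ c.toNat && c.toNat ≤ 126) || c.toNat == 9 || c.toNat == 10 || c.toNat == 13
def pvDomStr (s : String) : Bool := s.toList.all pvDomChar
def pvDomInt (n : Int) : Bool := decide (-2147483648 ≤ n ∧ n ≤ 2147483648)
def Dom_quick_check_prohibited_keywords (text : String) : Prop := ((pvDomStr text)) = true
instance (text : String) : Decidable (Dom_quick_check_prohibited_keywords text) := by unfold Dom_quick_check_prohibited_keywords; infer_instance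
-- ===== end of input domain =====

-- B replaces A's per-keyword substring scans by one left-to-right scan of the
-- text testing all keywords at each position (alternative algorithm, same cost).

-- ===== PORT A =====
def pvWordsA : List String :=
  ["porn", "xxx", "sexe", "drogue", "cannabis", "cocaine",
   "arme", "pistolet", "explosif", "escort", "casino"]

-- the 'for word in …: if word in text_lower: return True' loop
def pvLoopA (text_lower : String) : List String → Bool
  | [] => false
  | w :: ws => if PySem.Str.isIn w text_lower then true else pvLoopA text_lower ws

def quick_check_prohibited_keywords (text : String) : Bool :=
  let text_lower := PySem.Str.lower text
  pvLoopA text_lower pvWordsA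

-- ===== PORT B =====
def pvWordsB : List (List Char) :=
  ["porn", "xxx", "sexe", "drogue", "cannabis", "cocaine",
   "arme", "pistolet", "explosif", "escort", "casino"].map String.toList

-- the position loop: at each suffix, does some keyword start here?
def pvScanB (words : List (List Char)) : List Char → Bool
  | [] => words.any (fun w => w.isPrefixOf [])
  | c :: rest => words.any (fun w => w.isPrefixOf (c :: rest)) || pvScanB words rest

def quick_check_prohibited_keywords_alt (text : String) : Bool :=
  pvScanB pvWordsB (PySem.Chars.lower text.toList)

-- ===== PRECONDITION & SPEC =====
def Spec_quick_check_prohibited_keywords (text : String) (out : Bool) : Prop := out = quick_check_prohibited_keywords_alt text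
instance (text : String) (out : Bool) : Decidable (Spec_quick_check_prohibited_keywords text out) := by unfold Spec_quick_check_prohibited_keywords; infer_instance

-- ===== CLAIM (what is proved, stated in full; the proofs are below) =====
def Claim_equal_quick_check_prohibited_keywords : Prop := ∀ (text : String), Dom_quick_check_prohibited_keywords text → Spec_quick_check_prohibited_keywords text (quick_check_prohibited_keywords text)

-- ===== LEMMAS AND PROOFS =====

theorem pvLoopA_iff (t : String) (ws : List String) :
    pvLoopA t ws = true ↔ ∃ w ∈ ws, PySem.Str.isIn w t = true := by
  induction ws with
  | nil => simp [pvLoopA]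
  | cons w ws ih =>
    unfold pvLoopA
    split
    · next h => simp_all
    · next h => simp_all

theorem pvScanB_iff (ws : List (List Char)) (s : List Char) :
    pvScanB ws s = true ↔ ∃ w ∈ ws, ∃ j, w <+: s.drop j := by
  induction s with
  | nil =>
    simp only [pvScanB, List.any_eq_true, List.isPrefixOf_iff_prefix, List.drop_nil]
    exact ⟨fun ⟨w, hw, hp⟩ => ⟨w, hw, 0, hp⟩, fun ⟨w, hw, _, hp⟩ => ⟨w, hw, hp⟩⟩
  | cons c rest ih =>
    simp only [pvScanB, Bool.or_eq_true, List.any_eq_true, List.isPrefixOf_iff_prefix, ih]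
    constructor
    · rintro (⟨w, hw, hp⟩ | ⟨w, hw, j, hp⟩)
      · exact ⟨w, hw, 0, hp⟩
      · exact ⟨w, hw, j + 1, by simpa using hp⟩
    · rintro ⟨w, hw, j, hp⟩
      cases j with
      | zero => exact Or.inl ⟨w, hw, hp⟩
      | succ j => exact Or.inr ⟨w, hw, j, by simpa using hp⟩

-- ===== VERDICT (by name: the statement is the Claim_ definition above) =====
theorem quick_check_prohibited_keywords_spec : Claim_equal_quick_check_prohibited_keywords := by
  intro text _
  unfold Spec_quick_check_prohibited_keywords quick_check_prohibited_keywords quick_check_prohibited_keywords_alt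
  rw [Bool.eq_iff_iff, pvLoopA_iff, pvScanB_iff]
  simp only [pvWordsA, pvWordsB, List.mem_map, List.mem_cons, List.not_mem_nil]
  constructor
  · rintro ⟨w, hw, hin⟩
    refine ⟨w.toList, ⟨w, hw, rfl⟩, ?_⟩
    rw [PySem.Chars.exists_prefix_drop_iff_isIn]
    simpa [PySem.Str.isIn_eq] using hin
  · rintro ⟨wl, ⟨w, hw, rfl⟩, hp⟩
    refine ⟨w, hw, ?_⟩
    rw [PySem.Chars.exists_prefix_drop_iff_isIn] at hp
    simpa [PySem.Str.isIn_eq] using hp
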